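-- pv_equiv track=rewrite | github.com/AMD-AGI/TraceLens | TraceLens/TraceUtils/split_inference_trace_annotation.py | find_phase_from_window
-- ===== SOURCE A (Python) =====
-- from typing import List, Set, Tuple, Optional
--
-- def find_phase_from_window(iter_details: List[dict]) -> dict:
--
--     num_prefill = len(
--         [
--             d
--             for d in iter_details
--             if d.get("context_requests", 0) > 0 and d.get("generation_requests", 0) == 0
--         ]
--     )
--     num_prefilldecode = len(
--         [
--             d
--             for d in iter_details
--             if d.get("context_requests", 0) > 0 and d.get("generation_requests", 0) > 0
--         ]
--     )
--
--     num_decode = len(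
--         [
--             d
--             for d in iter_details
--             if d.get("generation_requests", 0) > 0 and d.get("context_requests", 0) == 0
--         ]
--     )
--     avg_batch_size = int(
--         sum(d.get("batch_size", 0) for d in iter_details) / len(iter_details)
--     )
--     avg_concurrency = int(
--         sum(d.get("num_requests", 0) for d in iter_details) / len(iter_details)
--     )
--
--     return {
--         "num_prefill": num_prefill,
--         "num_prefilldecode": num_prefilldecode,
--         "num_decode": num_decode,
--         "avg_bs": avg_batch_size,
--         "avg_conc": avg_concurrency,
--     }
-- ===== SOURCE B (Python) =====
-- def _phase(d):
--     c = d.get("context_requests", 0)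
--     g = d.get("generation_requests", 0)
--     if c > 0 and g == 0:
--         return "num_prefill"
--     if c > 0 and g > 0:
--         return "num_prefilldecode"
--     if g > 0 and c == 0:
--         return "num_decode"
--     return None
--
--
-- def find_phase_from_window(iter_details):
--     # histogram of phase labels, built once; counts are then dictionary lookups
--     hist = {}
--     for d in iter_details:
--         k = _phase(d)
--         hist[k] = hist.get(k, 0) + 1
--     n = len(iter_details)
--     return {
--         "num_prefill": hist.get("num_prefill", 0),
--         "num_prefilldecode": hist.get("num_prefilldecode", 0),
--         "num_decode": hist.get("num_decode", 0),
--         "avg_bs": int(sum(map(lambda d: d.get("batch_size", 0), iter_details)) / n),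
--         "avg_conc": int(sum(map(lambda d: d.get("num_requests", 0), iter_details)) / n),
--     }
-- ===== Notes on version B (the rewrite author's own statement) =====
-- stated objective: alternative
-- what changed: Replaces A's three filter-comprehension scans with a classification function that maps each element to a phase label and a frequency dictionary (histogram) built in one pass, from which the three counts are read by lookup; the averages are computed from sum(map(...)).
import Mathlib
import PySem

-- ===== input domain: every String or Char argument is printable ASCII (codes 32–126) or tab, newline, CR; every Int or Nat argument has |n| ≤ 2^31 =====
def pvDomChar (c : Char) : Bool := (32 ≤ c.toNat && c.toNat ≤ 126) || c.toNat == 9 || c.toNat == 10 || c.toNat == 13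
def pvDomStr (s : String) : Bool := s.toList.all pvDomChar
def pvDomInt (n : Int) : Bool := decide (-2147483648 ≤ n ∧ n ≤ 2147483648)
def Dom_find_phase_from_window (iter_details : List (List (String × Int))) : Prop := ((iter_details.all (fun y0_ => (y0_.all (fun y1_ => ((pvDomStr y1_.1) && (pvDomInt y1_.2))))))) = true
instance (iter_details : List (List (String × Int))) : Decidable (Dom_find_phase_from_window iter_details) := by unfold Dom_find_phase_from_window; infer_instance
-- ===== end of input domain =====

-- B classifies each element to a phase label and builds a frequency dictionary once, reading the
-- three counts by lookup, instead of A's three filter scans; objective: alternative, same O(n).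
-- avg fields use Python's int(sum/len) float true division, ported as PySem.Int.truncdiv (exact for |sum| < 2^53).

-- shared helper: d.get(key, 0) on an association list (first match)
def pvGet (d : List (String × Int)) (k : String) : Int :=
  match d.find? (fun p => p.1 == k) with
  | some p => p.2
  | none => 0

-- ===== PORT A =====
def find_phase_from_window (iter_details : List (List (String × Int))) : List (String × Int) :=
  let num_prefill : Int :=
    ((iter_details.filter (fun d => decide (pvGet d "context_requests" > 0) && decide (pvGet d "generation_requests" = 0))).length : Int)
  let num_prefilldecode : Int :=
    ((iter_details.filter (fun d => decide (pvGet d "context_requests" > 0) && decide (pvGet d "generation_requests" > 0))).length : Int)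
  let num_decode : Int :=
    ((iter_details.filter (fun d => decide (pvGet d "generation_requests" > 0) && decide (pvGet d "context_requests" = 0))).length : Int)
  let avg_batch_size : Int :=
    PySem.Int.truncdiv (iter_details.foldl (fun a d => a + pvGet d "batch_size") 0) (iter_details.length : Int)
  let avg_concurrency : Int :=
    PySem.Int.truncdiv (iter_details.foldl (fun a d => a + pvGet d "num_requests") 0) (iter_details.length : Int)
  [("num_prefill", num_prefill), ("num_prefilldecode", num_prefilldecode),
   ("num_decode", num_decode), ("avg_bs", avg_batch_size), ("avg_conc", avg_concurrency)]

-- ===== PORT B =====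
-- _phase in Source B: the phase label of one element (None → Option.none)
def pvPhase (d : List (String × Int)) : Option String :=
  let c := pvGet d "context_requests"
  let g := pvGet d "generation_requests"
  if c > 0 ∧ g = 0 then some "num_prefill"
  else if c > 0 ∧ g > 0 then some "num_prefilldecode"
  else if g > 0 ∧ c = 0 then some "num_decode"
  else none

def find_phase_from_window_alt (iter_details : List (List (String × Int))) : List (String × Int) :=
  let hist : PySem.Dict (Option String) Int :=
    iter_details.foldl (fun h d => let k := pvPhase d; h.insert k (h.getD k 0 + 1)) PySem.Dict.empty
  let n : Int := (iter_details.length : Int)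
  [("num_prefill", hist.getD (some "num_prefill") 0),
   ("num_prefilldecode", hist.getD (some "num_prefilldecode") 0),
   ("num_decode", hist.getD (some "num_decode") 0),
   ("avg_bs", PySem.Int.truncdiv ((iter_details.map (fun d => pvGet d "batch_size")).sum) n),
   ("avg_conc", PySem.Int.truncdiv ((iter_details.map (fun d => pvGet d "num_requests")).sum) n)]

-- ===== PRECONDITION & SPEC =====
-- Pre_ excludes only the empty list, on which Python A raises ZeroDivisionError (B raises it too).
def Pre_find_phase_from_window (iter_details : List (List (String × Int))) : Prop := iter_details ≠ []
instance (iter_details : List (List (String × Int))) : Decidable (Pre_find_phase_from_window iter_details) := by unfold Pre_find_phase_from_window; infer_instance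
def pvWitness_find_phase_from_window : (List (List (String × Int))) := [[("context_requests", 2), ("batch_size", 3)]]

def Spec_find_phase_from_window (iter_details : List (List (String × Int))) (out : List (String × Int)) : Prop := out = find_phase_from_window_alt iter_details
instance (iter_details : List (List (String × Int))) (out : List (String × Int)) : Decidable (Spec_find_phase_from_window iter_details out) := by unfold Spec_find_phase_from_window; infer_instance

-- ===== CLAIM (what is proved, stated in full; the proofs are below) =====
def Claim_equal_find_phase_from_window : Prop := ∀ (iter_details : List (List (String × Int))), Dom_find_phase_from_window iter_details → Pre_find_phase_from_window iter_details → Spec_find_phase_from_window iter_details (find_phase_from_window iter_details)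

-- ===== LEMMAS AND PROOFS =====
-- the histogram lookup at a label equals the length of A's corresponding filter
lemma hist_getD (l : List (List (String × Int))) (s : String) :
    (l.foldl (fun h d => let k := pvPhase d; h.insert k (h.getD k 0 + 1))
        (PySem.Dict.empty : PySem.Dict (Option String) Int)).getD (some s) 0 =
      ((l.filter (fun d => pvPhase d == some s)).length : Int) := by
  have h1 : (l.map pvPhase).foldl (fun h k => h.insert k (h.getD k 0 + 1))
      (PySem.Dict.empty : PySem.Dict (Option String) Int) =
      l.foldl (fun h d => let k := pvPhase d; h.insert k (h.getD k 0 + 1)) PySem.Dict.empty := by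
    rw [List.foldl_map]
  rw [← h1, PySem.Dict.foldl_insert_getD_add_one_eq_counter, PySem.Dict.getD_counter]
  simp only [List.count, List.countP_map, Function.comp_def]
  rw [List.countP_eq_length_filter]

lemma sum_eq_foldl (l : List (List (String × Int))) (k : String) :
    l.foldl (fun a d => a + pvGet d k) 0 = (l.map (fun d => pvGet d k)).sum := by
  rw [PySem.List.foldl_add]; simp

-- each phase label test equals A's corresponding compound predicate
lemma phase_eq_prefill (d : List (String × Int)) :
    (pvPhase d == some "num_prefill")
      = (decide (pvGet d "context_requests" > 0) && decide (pvGet d "generation_requests" = 0)) := by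
  simp only [pvPhase]; split_ifs with h1 h2 h3 <;> simp_all

lemma phase_eq_prefilldecode (d : List (String × Int)) :
    (pvPhase d == some "num_prefilldecode")
      = (decide (pvGet d "context_requests" > 0) && decide (pvGet d "generation_requests" > 0)) := by
  simp only [pvPhase]; split_ifs with h1 h2 h3 <;> simp_all

lemma phase_eq_decode (d : List (String × Int)) :
    (pvPhase d == some "num_decode")
      = (decide (pvGet d "generation_requests" > 0) && decide (pvGet d "context_requests" = 0)) := by
  simp only [pvPhase]; split_ifs with h1 h2 h3 <;> simp_all
  omega

-- ===== VERDICT (by name: the statement is the Claim_ definition above) =====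
theorem find_phase_from_window_spec : Claim_equal_find_phase_from_window := by
  intro its _ _
  unfold Spec_find_phase_from_window find_phase_from_window find_phase_from_window_alt
  simp only [hist_getD, sum_eq_foldl, phase_eq_prefill, phase_eq_prefilldecode, phase_eq_decode]
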